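-- pv_equiv track=rewrite | github.com/Betawolf/text-spew | char-generator.py | transition_table
-- ===== SOURCE A (Python) =====
-- def transition_table(corpus, frequency_table):
--   flat = [char for message in corpus for char in message]
--   ttable = {}
--   for i in range(0, len(flat)-1):
--     w1 = flat[i]
--     w2 = flat[i+1]
--     if frequency_table[w1] > 1:
--       if w1 not in ttable:
--         ttable[w1] = {}
--       if w2 not in ttable[w1]:
--         ttable[w1][w2] = 1
--       else:
--         ttable[w1][w2] += 1
--   return ttable
-- ===== SOURCE B (Python) =====
-- def transition_table(corpus, frequency_table):
--   flat = [char for message in corpus for char in message]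
--   counts = {}
--   for pair in zip(flat, flat[1:]):
--     counts[pair] = counts.get(pair, 0) + 1
--   ttable = {}
--   for (w1, w2), c in counts.items():
--     if frequency_table[w1] > 1:
--       if w1 not in ttable:
--         ttable[w1] = {}
--       ttable[w1][w2] = c
--   return ttable
-- ===== Notes on version B (the rewrite author's own statement) =====
-- stated objective: alternative
-- what changed: B replaces A's per-index loop with incremental nested-dict updates by a single flat bigram counter keyed by the character pair, from whose items the nested table is assembled in a second pass.
import Mathlib
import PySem

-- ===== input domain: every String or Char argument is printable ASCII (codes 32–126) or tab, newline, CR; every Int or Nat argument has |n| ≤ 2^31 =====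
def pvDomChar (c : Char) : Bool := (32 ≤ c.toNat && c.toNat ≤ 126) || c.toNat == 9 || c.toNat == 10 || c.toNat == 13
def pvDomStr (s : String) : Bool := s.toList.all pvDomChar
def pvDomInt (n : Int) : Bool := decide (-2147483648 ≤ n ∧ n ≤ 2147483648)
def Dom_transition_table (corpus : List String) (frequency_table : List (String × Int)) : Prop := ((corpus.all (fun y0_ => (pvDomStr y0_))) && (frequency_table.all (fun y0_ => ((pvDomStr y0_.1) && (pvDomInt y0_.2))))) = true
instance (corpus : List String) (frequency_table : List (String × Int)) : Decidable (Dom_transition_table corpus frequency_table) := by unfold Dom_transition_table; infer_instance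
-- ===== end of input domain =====

-- B replaces A's per-index incremental nested-dict updates by a single flat bigram counter
-- (a dict keyed by the character pair) built in one pass, from whose items the nested table
-- is assembled afterwards; objective: alternative (a different algorithm of similar cost).

-- ===== PORT A =====
def transition_table (corpus : List String) (frequency_table : List (String × Int)) :
    List (String × List (String × Int)) :=
  let flat : List Char := corpus.flatMap String.toList
  let fd : PySem.Dict String Int := PySem.Dict.mk frequency_table
  let ttable : PySem.Dict String (PySem.Dict String Int) :=
    (PySem.List.pyRange 0 ((flat.length : Int) - 1)).foldl (fun ttable i =>
      let w1 : String := (PySem.List.pyGetD flat i ' ').toString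
      let w2 : String := (PySem.List.pyGetD flat (i + 1) ' ').toString
      if fd.getD w1 0 > 1 then
        let ttable := if ttable.contains w1 then ttable
                      else ttable.insert w1 PySem.Dict.empty
        if (ttable.getD w1 PySem.Dict.empty).contains w2 = false then
          ttable.insert w1 ((ttable.getD w1 PySem.Dict.empty).insert w2 1)
        else
          ttable.insert w1 ((ttable.getD w1 PySem.Dict.empty).modify w2 0 (· + 1))
      else ttable) PySem.Dict.empty
  ttable.items.map (fun p => (p.1, p.2.items))

-- ===== PORT B =====
def transition_table_alt (corpus : List String) (frequency_table : List (String × Int)) :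
    List (String × List (String × Int)) :=
  let flat : List Char := corpus.flatMap String.toList
  let fd : PySem.Dict String Int := PySem.Dict.mk frequency_table
  let counts : PySem.Dict (Char × Char) Int :=
    (flat.zip (PySem.List.slice flat (some 1))).foldl
      (fun counts pair => counts.insert pair (counts.getD pair 0 + 1)) PySem.Dict.empty
  let ttable : PySem.Dict String (PySem.Dict String Int) :=
    counts.items.foldl (fun ttable e =>
      let w1 : String := e.1.1.toString
      let w2 : String := e.1.2.toString
      if fd.getD w1 0 > 1 then
        let ttable := if ttable.contains w1 then ttable
                      else ttable.insert w1 PySem.Dict.empty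
        ttable.insert w1 ((ttable.getD w1 PySem.Dict.empty).insert w2 e.2)
      else ttable) PySem.Dict.empty
  ttable.items.map (fun p => (p.1, p.2.items))


-- ===== PRECONDITION & SPEC =====
-- Pre_ excludes exactly the inputs on which the Python A raises KeyError: some bigram-starting
-- character (every flattened character except the last) is missing from frequency_table.
def Pre_transition_table (corpus : List String) (frequency_table : List (String × Int)) : Prop :=
  (((corpus.flatMap String.toList).dropLast).all
    (fun c => (PySem.Dict.mk frequency_table).contains c.toString)) = true
instance (corpus : List String) (frequency_table : List (String × Int)) : Decidable (Pre_transition_table corpus frequency_table) := by unfold Pre_transition_table; infer_instance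

def pvWitness_transition_table : List String × (List (String × Int)) :=
  (["ab", "a"], [("a", 2), ("b", 1)])

def Spec_transition_table (corpus : List String) (frequency_table : List (String × Int)) (out : List (String × List (String × Int))) : Prop := out = transition_table_alt corpus frequency_table
instance (corpus : List String) (frequency_table : List (String × Int)) (out : List (String × List (String × Int))) : Decidable (Spec_transition_table corpus frequency_table out) := by unfold Spec_transition_table; infer_instance

-- ===== CLAIM (what is proved, stated in full; the proofs are below) =====
def Claim_equal_transition_table : Prop := ∀ (corpus : List String) (frequency_table : List (String × Int)), Dom_transition_table corpus frequency_table → Pre_transition_table corpus frequency_table → Spec_transition_table corpus frequency_table (transition_table corpus frequency_table)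

-- ===== LEMMAS AND PROOFS =====

theorem pvToString_inj {a b : Char} (h : a.toString = b.toString) : a = b := by
  have := congrArg String.toList h
  simpa [Char.toString] using this

theorem pvSet_ofList_append_singleton {α : Type} [BEq α] (l : List α) (x : α) :
    PySem.Set.ofList (l ++ [x]) = PySem.Set.add (PySem.Set.ofList l) x := by
  simp [PySem.Set.ofList, List.foldl_append]

theorem pvOfList_filter {α : Type} [BEq α] [LawfulBEq α] (l : List α) (p : α → Bool) :
    PySem.Set.ofList (l.filter p) = (PySem.Set.ofList l).filter p := by
  induction l using List.reverseRecOn with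
  | nil => rfl
  | append_singleton l x ih =>
      rw [List.filter_append]
      by_cases hp : p x = true
      · rw [show List.filter p [x] = [x] from by simp [hp], pvSet_ofList_append_singleton, ih,
          pvSet_ofList_append_singleton]
        unfold PySem.Set.add
        by_cases hm : x ∈ PySem.Set.ofList l
        · have h2 : x ∈ List.filter p (PySem.Set.ofList l) := List.mem_filter.2 ⟨hm, hp⟩
          rw [if_pos (by simpa using h2), if_pos (by simpa using hm)]
        · have h2 : x ∉ List.filter p (PySem.Set.ofList l) := fun h => hm (List.mem_filter.1 h).1
          rw [if_neg (by simpa using h2), if_neg (by simpa using hm), List.filter_append]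
          simp [hp]
      · rw [show List.filter p [x] = [] from by simp [hp], List.append_nil, ih,
          pvSet_ofList_append_singleton]
        unfold PySem.Set.add
        by_cases hm : x ∈ PySem.Set.ofList l
        · rw [if_pos (by simpa using hm)]
        · rw [if_neg (by simpa using hm), List.filter_append]
          simp [hp]

theorem pvOfList_map_injOn {α β : Type} [BEq α] [LawfulBEq α] [BEq β] [LawfulBEq β]
    (l : List α) (f : α → β) (h : ∀ x ∈ l, ∀ y ∈ l, f x = f y → x = y) :
    PySem.Set.ofList (l.map f) = (PySem.Set.ofList l).map f := by
  induction l using List.reverseRecOn with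
  | nil => rfl
  | append_singleton l x ih =>
      have h' : ∀ a ∈ l, ∀ b ∈ l, f a = f b → a = b := fun a ha b hb =>
        h a (List.mem_append_left _ ha) b (List.mem_append_left _ hb)
      rw [List.map_append]
      simp only [List.map_cons, List.map_nil]
      rw [pvSet_ofList_append_singleton, pvSet_ofList_append_singleton, ih h']
      unfold PySem.Set.add
      by_cases hm : x ∈ PySem.Set.ofList l
      · have hm' : x ∈ l := (PySem.Set.mem_ofList l x).1 hm
        have hf : f x ∈ (PySem.Set.ofList l).map f := List.mem_map_of_mem hm
        rw [if_pos (by simpa using hf), if_pos (by simpa using hm)]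
      · have hm' : x ∉ l := fun hx => hm ((PySem.Set.mem_ofList l x).2 hx)
        have hf : f x ∉ (PySem.Set.ofList l).map f := by
          intro hx
          obtain ⟨y, hy, hfy⟩ := List.mem_map.1 hx
          have hyl : y ∈ l := (PySem.Set.mem_ofList l y).1 hy
          exact hm' (h y (List.mem_append_left _ hyl) x (List.mem_append_right _ (by simp)) hfy ▸ hyl)
        rw [if_neg (by simpa using hf), if_neg (by simpa using hm), List.map_append]
        simp

theorem pvOfList_map_ofList {α β : Type} [BEq α] [LawfulBEq α] [BEq β] [LawfulBEq β]
    (l : List α) (f : α → β) :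
    PySem.Set.ofList ((PySem.Set.ofList l).map f) = PySem.Set.ofList (l.map f) := by
  induction l using List.reverseRecOn with
  | nil => rfl
  | append_singleton l x ih =>
      rw [pvSet_ofList_append_singleton, List.map_append]
      simp only [List.map_cons, List.map_nil]
      rw [pvSet_ofList_append_singleton]
      conv_lhs => rw [PySem.Set.add]
      by_cases hm : x ∈ PySem.Set.ofList l
      · rw [if_pos (by simpa using hm), ih]
        have hfm : f x ∈ l.map f := List.mem_map_of_mem ((PySem.Set.mem_ofList l x).1 hm)
        rw [PySem.Set.add, if_pos (by simpa using hfm)]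
      · rw [if_neg (by simpa using hm), List.map_append]
        simp only [List.map_cons, List.map_nil]
        rw [pvSet_ofList_append_singleton, ih]

theorem pvCount_map_injOn {α β : Type} [BEq α] [LawfulBEq α] [BEq β] [LawfulBEq β]
    (l : List α) (f : α → β) (x : α) (h : ∀ y ∈ l, f y = f x → y = x) :
    (l.map f).count (f x) = l.count x := by
  induction l with
  | nil => rfl
  | cons a t ih =>
      have ht : ∀ y ∈ t, f y = f x → y = x := fun y hy => h y (List.mem_cons_of_mem _ hy)
      by_cases hax : a = x
      · subst hax
        simp [List.count_cons, ih ht]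
      · have : f a ≠ f x := fun hf => hax (h a List.mem_cons_self hf)
        simp [List.count_cons, ih ht, hax, this]

theorem pvContains_mkForm (S : List Char) (q : Char → PySem.Dict String Int) (a : Char) :
    (PySem.Dict.mk (S.map (fun x => (x.toString, q x)))).contains a.toString = S.contains a := by
  simp only [PySem.Dict.contains, List.any_map]
  rw [Bool.eq_iff_iff, List.any_eq_true, List.contains_iff_mem]
  constructor
  · rintro ⟨x, hx, he⟩
    have : x.toString = a.toString := by simpa using he
    exact (pvToString_inj this) ▸ hx
  · intro ha; exact ⟨a, ha, by simp⟩

theorem pvGetD_mkForm (S : List Char) (q : Char → PySem.Dict String Int) (a : Char)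
    (hnd : S.Nodup) (ha : a ∈ S) :
    (PySem.Dict.mk (S.map (fun x => (x.toString, q x)))).getD a.toString PySem.Dict.empty = q a := by
  apply PySem.Dict.getD_of_mem_items
  · exact List.mem_map_of_mem ha
  · show (List.map (fun x => (x.toString, q x)) S).map (fun p => p.1) |>.Nodup
    rw [List.map_map]
    refine List.Nodup.map_on ?_ hnd
    intro x _ y _ h
    exact pvToString_inj h

def pvStepA2 (fd : PySem.Dict String Int)
    (ttable : PySem.Dict String (PySem.Dict String Int)) (p : Char × Char) :
    PySem.Dict String (PySem.Dict String Int) :=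
  if (ttable.getD p.1.toString PySem.Dict.empty).contains p.2.toString = false then
    ttable.insert p.1.toString ((ttable.getD p.1.toString PySem.Dict.empty).insert p.2.toString 1)
  else
    ttable.insert p.1.toString ((ttable.getD p.1.toString PySem.Dict.empty).modify p.2.toString 0 (· + 1))

def pvStepA (fd : PySem.Dict String Int)
    (ttable : PySem.Dict String (PySem.Dict String Int)) (p : Char × Char) :
    PySem.Dict String (PySem.Dict String Int) :=
  if fd.getD p.1.toString 0 > 1 then
    pvStepA2 fd (if ttable.contains p.1.toString then ttable
                 else ttable.insert p.1.toString PySem.Dict.empty) p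
  else ttable

def pvPass (fd : PySem.Dict String Int) (a : Char) : Bool := fd.getD a.toString 0 > 1

def pvInner (ps : List (Char × Char)) (a : Char) : List String :=
  ((ps.filter (fun q => q.1 == a)).map (fun q => q.2)).map Char.toString

def pvForm (fd : PySem.Dict String Int) (ps : List (Char × Char)) :
    List (String × PySem.Dict String Int) :=
  ((PySem.Set.ofList (ps.map (fun p => p.1))).filter (pvPass fd)).map
    (fun a => (a.toString, PySem.Dict.counter (pvInner ps a)))

theorem pvInner_append_ne (ps : List (Char × Char)) (p : Char × Char) (a : Char)
    (h : ¬ p.1 = a) : pvInner (ps ++ [p]) a = pvInner ps a := by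
  simp [pvInner, List.filter_append, h]

theorem pvInner_append_self (ps : List (Char × Char)) (p : Char × Char) :
    pvInner (ps ++ [p]) p.1 = pvInner ps p.1 ++ [p.2.toString] := by
  simp [pvInner, List.filter_append]

theorem pvCounterStep (bs : List String) (w : String) :
    (if (PySem.Dict.counter bs).contains w = false then (PySem.Dict.counter bs).insert w 1
     else (PySem.Dict.counter bs).modify w 0 (· + 1)) = PySem.Dict.counter (bs ++ [w]) := by
  rw [PySem.Dict.counter_append_singleton]
  by_cases hc : (PySem.Dict.counter bs).contains w = true
  · simp [hc]
  · have hc' : (PySem.Dict.counter bs).contains w = false := by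
      cases h : (PySem.Dict.counter bs).contains w
      · rfl
      · exact absurd h hc
    rw [if_pos hc', PySem.Dict.modify, PySem.Dict.getD_of_not_contains _ _ hc']
    norm_num

theorem pvCounter_singleton (w : String) :
    PySem.Dict.counter [w] = PySem.Dict.empty.insert w 1 := by
  show PySem.Dict.empty.modify w 0 (· + 1) = _
  rw [PySem.Dict.modify, PySem.Dict.getD_of_not_contains _ _ (by rfl)]
  norm_num

theorem pvInner_nil (ps : List (Char × Char)) (a : Char)
    (h : a ∉ ps.map (fun p => p.1)) : pvInner ps a = [] := by
  unfold pvInner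
  rw [List.filter_eq_nil_iff.2]
  · rfl
  · intro q hq
    intro hbe
    exact h ((beq_iff_eq.1 hbe) ▸ List.mem_map_of_mem hq)

theorem pvBuildA_form (fd : PySem.Dict String Int) (ps : List (Char × Char)) :
    ps.foldl (pvStepA fd) PySem.Dict.empty = PySem.Dict.mk (pvForm fd ps) := by
  induction ps using List.reverseRecOn with
  | nil => rfl
  | append_singleton ps p ih =>
      rw [List.foldl_append, List.foldl_cons, List.foldl_nil, ih]
      by_cases hpass : fd.getD p.1.toString 0 > 1
      · have hpassb : pvPass fd p.1 = true := decide_eq_true hpass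
        by_cases hm : p.1 ∈ PySem.Set.ofList (ps.map (fun p => p.1))
        · -- first component already seen
          have hmS : p.1 ∈ (PySem.Set.ofList (ps.map (fun p => p.1))).filter (pvPass fd) :=
            List.mem_filter.2 ⟨hm, hpassb⟩
          have hnd : ((PySem.Set.ofList (ps.map (fun p => p.1))).filter (pvPass fd)).Nodup :=
            (PySem.Set.nodup_ofList _).filter _
          have hc1 : (PySem.Dict.mk (pvForm fd ps)).contains p.1.toString = true := by
            rw [show pvForm fd ps = ((PySem.Set.ofList (ps.map (fun p => p.1))).filter (pvPass fd)).map
              (fun a => (a.toString, PySem.Dict.counter (pvInner ps a))) from rfl, pvContains_mkForm]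
            simpa using hmS
          have hg : (PySem.Dict.mk (pvForm fd ps)).getD p.1.toString PySem.Dict.empty
              = PySem.Dict.counter (pvInner ps p.1) :=
            pvGetD_mkForm _ _ p.1 hnd hmS
          have hstep : pvStepA fd (PySem.Dict.mk (pvForm fd ps)) p
              = (PySem.Dict.mk (pvForm fd ps)).insert p.1.toString
                  (PySem.Dict.counter (pvInner ps p.1 ++ [p.2.toString])) := by
            unfold pvStepA pvStepA2
            rw [if_pos hpass, if_pos hc1, hg,
              ← apply_ite (fun v => (PySem.Dict.mk (pvForm fd ps)).insert p.1.toString v),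
              pvCounterStep]
          have hSame : pvForm fd (ps ++ [p])
              = ((PySem.Set.ofList (ps.map (fun p => p.1))).filter (pvPass fd)).map
                  (fun a => (a.toString, PySem.Dict.counter (pvInner (ps ++ [p]) a))) := by
            unfold pvForm
            rw [List.map_append]
            simp only [List.map_cons, List.map_nil]
            rw [pvSet_ofList_append_singleton, PySem.Set.add, if_pos (by simpa using hm)]
          rw [hstep]
          apply PySem.Dict.ext
          rw [PySem.Dict.items_insert_of_contains _ _ hc1]
          show (pvForm fd ps).map _ = pvForm fd (ps ++ [p])
          rw [hSame]
          unfold pvForm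
          rw [List.map_map]
          apply List.map_congr_left
          intro a haS
          by_cases hap : a = p.1
          · subst hap
            simp only [Function.comp_apply, beq_self_eq_true, if_true]
            rw [pvInner_append_self]
          · have hne : (a.toString == p.1.toString) = false := by
              simp only [beq_eq_false_iff_ne, ne_eq]
              exact fun h => hap (pvToString_inj h)
            simp only [Function.comp_apply, hne, Bool.false_eq_true, if_false]
            rw [pvInner_append_ne ps p a (fun h => hap h.symm)]
        · -- fresh first component
          have hmS : p.1 ∉ (PySem.Set.ofList (ps.map (fun p => p.1))).filter (pvPass fd) :=
            fun h => hm (List.mem_filter.1 h).1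
          have hnd : ((PySem.Set.ofList (ps.map (fun p => p.1))).filter (pvPass fd)).Nodup :=
            (PySem.Set.nodup_ofList _).filter _
          have hc1 : (PySem.Dict.mk (pvForm fd ps)).contains p.1.toString = false := by
            rw [show pvForm fd ps = ((PySem.Set.ofList (ps.map (fun p => p.1))).filter (pvPass fd)).map
              (fun a => (a.toString, PySem.Dict.counter (pvInner ps a))) from rfl, pvContains_mkForm]
            simpa using hmS
          have htt1 : (PySem.Dict.mk (pvForm fd ps)).insert p.1.toString PySem.Dict.empty
              = PySem.Dict.mk (pvForm fd ps ++ [(p.1.toString, PySem.Dict.empty)]) := by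
            apply PySem.Dict.ext
            rw [PySem.Dict.items_insert_of_not_contains _ _ hc1]
          have hrepr : pvForm fd ps ++ [(p.1.toString, PySem.Dict.empty)]
              = (((PySem.Set.ofList (ps.map (fun p => p.1))).filter (pvPass fd)) ++ [p.1]).map
                  (fun x => (x.toString, if x = p.1 then PySem.Dict.empty
                    else PySem.Dict.counter (pvInner ps x))) := by
            rw [List.map_append]
            simp only [List.map_cons, List.map_nil]
            congr 1
            · apply List.map_congr_left
              intro a ha
              have hax : ¬ a = p.1 := fun h => hmS (by rw [← h]; exact ha)
              simp only [hax, if_false]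
          have hnd2 : (((PySem.Set.ofList (ps.map (fun p => p.1))).filter (pvPass fd)) ++ [p.1]).Nodup := by
            refine List.Nodup.append hnd (List.nodup_singleton _) ?_
            intro a ha hb
            rw [List.mem_singleton] at hb
            subst hb
            exact hmS ha
          have hginner : (PySem.Dict.mk (pvForm fd ps ++ [(p.1.toString, PySem.Dict.empty)])).getD
              p.1.toString PySem.Dict.empty = PySem.Dict.empty := by
            rw [hrepr]
            have := pvGetD_mkForm _ (fun x => if x = p.1 then PySem.Dict.empty
              else PySem.Dict.counter (pvInner ps x)) p.1 hnd2 (by simp)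
            simpa using this
          have hc2 : (PySem.Dict.mk (pvForm fd ps ++ [(p.1.toString, PySem.Dict.empty)])).contains
              p.1.toString = true := by
            rw [hrepr, pvContains_mkForm]
            simp
          have hstep : pvStepA fd (PySem.Dict.mk (pvForm fd ps)) p
              = (PySem.Dict.mk (pvForm fd ps ++ [(p.1.toString, PySem.Dict.empty)])).insert p.1.toString
                  (PySem.Dict.empty.insert p.2.toString 1) := by
            unfold pvStepA pvStepA2
            rw [if_pos hpass, hc1]
            simp only [Bool.false_eq_true, if_false]
            rw [htt1, hginner]
            rw [if_pos (show (PySem.Dict.empty : PySem.Dict String Int).contains p.2.toString = false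
              from rfl)]
          have hInnerNew : PySem.Dict.counter (pvInner (ps ++ [p]) p.1)
              = PySem.Dict.empty.insert p.2.toString 1 := by
            rw [pvInner_append_self, pvInner_nil ps p.1 (by simpa using hm), List.nil_append,
              pvCounter_singleton]
          have hSplit : pvForm fd (ps ++ [p])
              = pvForm fd ps ++ [(p.1.toString, PySem.Dict.empty.insert p.2.toString 1)] := by
            unfold pvForm
            rw [List.map_append]
            simp only [List.map_cons, List.map_nil]
            rw [pvSet_ofList_append_singleton, PySem.Set.add, if_neg (by simpa using hm),
              List.filter_append,
              show List.filter (pvPass fd) [p.1] = [p.1] from by simp [hpassb], List.map_append]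
            congr 1
            · apply List.map_congr_left
              intro a ha
              have hax : ¬ a = p.1 := fun h => hmS (by rw [← h]; exact ha)
              rw [pvInner_append_ne ps p a (fun h => hax h.symm)]
            · simp only [List.map_cons, List.map_nil]
              rw [hInnerNew]
          rw [hstep]
          apply PySem.Dict.ext
          rw [PySem.Dict.items_insert_of_contains _ _ hc2]
          show (pvForm fd ps ++ [(p.1.toString, PySem.Dict.empty)]).map _ = pvForm fd (ps ++ [p])
          rw [hSplit, List.map_append]
          congr 1
          · conv_rhs => rw [← List.map_id (pvForm fd ps)]
            apply List.map_congr_left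
            intro e he
            obtain ⟨x, hx, rfl⟩ := List.mem_map.1 he
            have hax : ¬ x = p.1 := fun h => hmS (by rw [← h]; exact hx)
            have hne : (x.toString == p.1.toString) = false := by
              simp only [beq_eq_false_iff_ne, ne_eq]
              exact fun h => hax (pvToString_inj h)
            simp only [hne, Bool.false_eq_true, if_false, id_eq]
          · simp
      · -- frequency check fails: nothing changes
        have hpassb : pvPass fd p.1 = false := by
          unfold pvPass
          exact decide_eq_false hpass
        have hstep : pvStepA fd (PySem.Dict.mk (pvForm fd ps)) p = PySem.Dict.mk (pvForm fd ps) := by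
          unfold pvStepA
          rw [if_neg hpass]
        rw [hstep]
        congr 1
        unfold pvForm
        rw [List.map_append]
        simp only [List.map_cons, List.map_nil]
        rw [pvSet_ofList_append_singleton, PySem.Set.add]
        by_cases hm : p.1 ∈ PySem.Set.ofList (ps.map (fun p => p.1))
        · rw [if_pos (by simpa using hm)]
          apply List.map_congr_left
          intro a ha
          have hap : ¬ p.1 = a := by
            intro h
            have := (List.mem_filter.1 ha).2
            rw [← h, hpassb] at this
            exact Bool.false_ne_true this
          rw [pvInner_append_ne ps p a hap]
        · rw [if_neg (by simpa using hm), List.filter_append,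
            show List.filter (pvPass fd) [p.1] = [] from by simp [hpassb], List.append_nil]
          apply List.map_congr_left
          intro a ha
          have hap : ¬ p.1 = a := by
            intro h
            have := (List.mem_filter.1 ha).2
            rw [← h, hpassb] at this
            exact Bool.false_ne_true this
          rw [pvInner_append_ne ps p a hap]

def pvStepB (fd : PySem.Dict String Int)
    (ttable : PySem.Dict String (PySem.Dict String Int)) (e : (Char × Char) × Int) :
    PySem.Dict String (PySem.Dict String Int) :=
  if fd.getD e.1.1.toString 0 > 1 then
    (if ttable.contains e.1.1.toString then ttable
     else ttable.insert e.1.1.toString PySem.Dict.empty).insert e.1.1.toString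
      (((if ttable.contains e.1.1.toString then ttable
         else ttable.insert e.1.1.toString PySem.Dict.empty).getD e.1.1.toString
          PySem.Dict.empty).insert e.1.2.toString e.2)
  else ttable

def pvInnerB (E : List ((Char × Char) × Int)) (a : Char) : List (String × Int) :=
  (E.filter (fun e => e.1.1 == a)).map (fun e => (e.1.2.toString, e.2))

def pvFormB (fd : PySem.Dict String Int) (E : List ((Char × Char) × Int)) :
    List (String × PySem.Dict String Int) :=
  ((PySem.Set.ofList (E.map (fun e => e.1.1))).filter (pvPass fd)).map
    (fun a => (a.toString, PySem.Dict.mk (pvInnerB E a)))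

theorem pvInnerB_append_ne (E : List ((Char × Char) × Int)) (e : (Char × Char) × Int) (a : Char)
    (h : ¬ e.1.1 = a) : pvInnerB (E ++ [e]) a = pvInnerB E a := by
  simp [pvInnerB, List.filter_append, h]

theorem pvInnerB_append_self (E : List ((Char × Char) × Int)) (e : (Char × Char) × Int) :
    pvInnerB (E ++ [e]) e.1.1 = pvInnerB E e.1.1 ++ [(e.1.2.toString, e.2)] := by
  simp [pvInnerB, List.filter_append]

theorem pvInnerB_nil (E : List ((Char × Char) × Int)) (a : Char)
    (h : a ∉ E.map (fun e => e.1.1)) : pvInnerB E a = [] := by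
  unfold pvInnerB
  rw [List.filter_eq_nil_iff.2]
  · rfl
  · intro q hq hbe
    exact h ((beq_iff_eq.1 hbe) ▸ List.mem_map_of_mem hq)

theorem pvInnerB_not_contains (E : List ((Char × Char) × Int)) (e : (Char × Char) × Int)
    (h : e.1 ∉ E.map (fun x => x.1)) :
    (PySem.Dict.mk (pvInnerB E e.1.1)).contains e.1.2.toString = false := by
  rw [Bool.eq_false_iff]
  intro hc
  simp only [PySem.Dict.contains, pvInnerB, List.any_map, List.any_eq_true] at hc
  obtain ⟨x, hx, hbe⟩ := hc
  rw [List.mem_filter] at hx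
  have h1 : x.1.1 = e.1.1 := beq_iff_eq.1 hx.2
  have h2 : x.1.2 = e.1.2 := pvToString_inj (by simpa using hbe)
  have : x.1 = e.1 := Prod.ext h1 h2
  exact h (this ▸ List.mem_map_of_mem hx.1)

theorem pvBuildB_form (fd : PySem.Dict String Int) (E : List ((Char × Char) × Int))
    (hnd : (E.map (fun e => e.1)).Nodup) :
    E.foldl (pvStepB fd) PySem.Dict.empty = PySem.Dict.mk (pvFormB fd E) := by
  induction E using List.reverseRecOn with
  | nil => rfl
  | append_singleton E e ih =>
      rw [List.map_append, List.nodup_append] at hnd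
      obtain ⟨hnd1, _, hdisj⟩ := hnd
      have hkey : e.1 ∉ E.map (fun x => x.1) := fun hm => hdisj _ hm e.1 (by simp) rfl
      rw [List.foldl_append, List.foldl_cons, List.foldl_nil, ih hnd1]
      by_cases hpass : fd.getD e.1.1.toString 0 > 1
      · have hpassb : pvPass fd e.1.1 = true := decide_eq_true hpass
        by_cases hm : e.1.1 ∈ PySem.Set.ofList (E.map (fun x => x.1.1))
        · -- first component already seen
          have hmS : e.1.1 ∈ (PySem.Set.ofList (E.map (fun x => x.1.1))).filter (pvPass fd) :=
            List.mem_filter.2 ⟨hm, hpassb⟩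
          have hnd' : ((PySem.Set.ofList (E.map (fun x => x.1.1))).filter (pvPass fd)).Nodup :=
            (PySem.Set.nodup_ofList _).filter _
          have hc1 : (PySem.Dict.mk (pvFormB fd E)).contains e.1.1.toString = true := by
            rw [show pvFormB fd E = ((PySem.Set.ofList (E.map (fun x => x.1.1))).filter (pvPass fd)).map
              (fun a => (a.toString, PySem.Dict.mk (pvInnerB E a))) from rfl, pvContains_mkForm]
            simpa using hmS
          have hg : (PySem.Dict.mk (pvFormB fd E)).getD e.1.1.toString PySem.Dict.empty
              = PySem.Dict.mk (pvInnerB E e.1.1) :=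
            pvGetD_mkForm _ _ e.1.1 hnd' hmS
          have hv : (PySem.Dict.mk (pvInnerB E e.1.1)).insert e.1.2.toString e.2
              = PySem.Dict.mk (pvInnerB (E ++ [e]) e.1.1) := by
            apply PySem.Dict.ext
            rw [PySem.Dict.items_insert_of_not_contains _ _ (pvInnerB_not_contains E e hkey)]
            rw [show (PySem.Dict.mk (pvInnerB (E ++ [e]) e.1.1)).items = pvInnerB (E ++ [e]) e.1.1
              from rfl, pvInnerB_append_self]
          have hstep : pvStepB fd (PySem.Dict.mk (pvFormB fd E)) e
              = (PySem.Dict.mk (pvFormB fd E)).insert e.1.1.toString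
                  (PySem.Dict.mk (pvInnerB (E ++ [e]) e.1.1)) := by
            unfold pvStepB
            rw [if_pos hpass, if_pos hc1, hg, hv]
          have hSame : pvFormB fd (E ++ [e])
              = ((PySem.Set.ofList (E.map (fun x => x.1.1))).filter (pvPass fd)).map
                  (fun a => (a.toString, PySem.Dict.mk (pvInnerB (E ++ [e]) a))) := by
            unfold pvFormB
            rw [List.map_append]
            simp only [List.map_cons, List.map_nil]
            rw [pvSet_ofList_append_singleton, PySem.Set.add, if_pos (by simpa using hm)]
          rw [hstep]
          apply PySem.Dict.ext
          rw [PySem.Dict.items_insert_of_contains _ _ hc1]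
          show (pvFormB fd E).map _ = pvFormB fd (E ++ [e])
          rw [hSame]
          unfold pvFormB
          rw [List.map_map]
          apply List.map_congr_left
          intro a haS
          by_cases hap : a = e.1.1
          · subst hap
            simp only [Function.comp_apply, beq_self_eq_true, if_true]
          · have hne : (a.toString == e.1.1.toString) = false := by
              simp only [beq_eq_false_iff_ne, ne_eq]
              exact fun h => hap (pvToString_inj h)
            simp only [Function.comp_apply, hne, Bool.false_eq_true, if_false]
            rw [pvInnerB_append_ne E e a (fun h => hap h.symm)]
        · -- fresh first component
          have hmS : e.1.1 ∉ (PySem.Set.ofList (E.map (fun x => x.1.1))).filter (pvPass fd) :=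
            fun h => hm (List.mem_filter.1 h).1
          have hnd' : ((PySem.Set.ofList (E.map (fun x => x.1.1))).filter (pvPass fd)).Nodup :=
            (PySem.Set.nodup_ofList _).filter _
          have hc1 : (PySem.Dict.mk (pvFormB fd E)).contains e.1.1.toString = false := by
            rw [show pvFormB fd E = ((PySem.Set.ofList (E.map (fun x => x.1.1))).filter (pvPass fd)).map
              (fun a => (a.toString, PySem.Dict.mk (pvInnerB E a))) from rfl, pvContains_mkForm]
            simpa using hmS
          have htt1 : (PySem.Dict.mk (pvFormB fd E)).insert e.1.1.toString PySem.Dict.empty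
              = PySem.Dict.mk (pvFormB fd E ++ [(e.1.1.toString, PySem.Dict.empty)]) := by
            apply PySem.Dict.ext
            rw [PySem.Dict.items_insert_of_not_contains _ _ hc1]
          have hrepr : pvFormB fd E ++ [(e.1.1.toString, PySem.Dict.empty)]
              = (((PySem.Set.ofList (E.map (fun x => x.1.1))).filter (pvPass fd)) ++ [e.1.1]).map
                  (fun x => (x.toString, if x = e.1.1 then PySem.Dict.empty
                    else PySem.Dict.mk (pvInnerB E x))) := by
            rw [List.map_append]
            simp only [List.map_cons, List.map_nil]
            congr 1
            · apply List.map_congr_left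
              intro a ha
              have hax : ¬ a = e.1.1 := fun h => hmS (by rw [← h]; exact ha)
              simp only [hax, if_false]
          have hnd2 : (((PySem.Set.ofList (E.map (fun x => x.1.1))).filter (pvPass fd)) ++ [e.1.1]).Nodup := by
            refine List.Nodup.append hnd' (List.nodup_singleton _) ?_
            intro a ha hb
            rw [List.mem_singleton] at hb
            subst hb
            exact hmS ha
          have hginner : (PySem.Dict.mk (pvFormB fd E ++ [(e.1.1.toString, PySem.Dict.empty)])).getD
              e.1.1.toString PySem.Dict.empty = PySem.Dict.empty := by
            rw [hrepr]
            have := pvGetD_mkForm _ (fun x => if x = e.1.1 then PySem.Dict.empty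
              else PySem.Dict.mk (pvInnerB E x)) e.1.1 hnd2 (by simp)
            simpa using this
          have hc2 : (PySem.Dict.mk (pvFormB fd E ++ [(e.1.1.toString, PySem.Dict.empty)])).contains
              e.1.1.toString = true := by
            rw [hrepr, pvContains_mkForm]
            simp
          have hstep : pvStepB fd (PySem.Dict.mk (pvFormB fd E)) e
              = (PySem.Dict.mk (pvFormB fd E ++ [(e.1.1.toString, PySem.Dict.empty)])).insert
                  e.1.1.toString (PySem.Dict.empty.insert e.1.2.toString e.2) := by
            unfold pvStepB
            rw [if_pos hpass, hc1]
            simp only [Bool.false_eq_true, if_false]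
            rw [htt1, hginner]
          have hInnerNew : PySem.Dict.mk (pvInnerB (E ++ [e]) e.1.1)
              = PySem.Dict.empty.insert e.1.2.toString e.2 := by
            rw [show (PySem.Dict.empty : PySem.Dict String Int).insert e.1.2.toString e.2
              = PySem.Dict.mk [(e.1.2.toString, e.2)] from by
                apply PySem.Dict.ext
                rw [PySem.Dict.items_insert_of_not_contains _ _ rfl]
                rfl]
            congr 1
            rw [pvInnerB_append_self, pvInnerB_nil E e.1.1 (by simpa using hm), List.nil_append]
          have hSplit : pvFormB fd (E ++ [e])
              = pvFormB fd E ++ [(e.1.1.toString, PySem.Dict.empty.insert e.1.2.toString e.2)] := by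
            unfold pvFormB
            rw [List.map_append]
            simp only [List.map_cons, List.map_nil]
            rw [pvSet_ofList_append_singleton, PySem.Set.add, if_neg (by simpa using hm),
              List.filter_append,
              show List.filter (pvPass fd) [e.1.1] = [e.1.1] from by simp [hpassb], List.map_append]
            congr 1
            · apply List.map_congr_left
              intro a ha
              have hax : ¬ a = e.1.1 := fun h => hmS (by rw [← h]; exact ha)
              rw [pvInnerB_append_ne E e a (fun h => hax h.symm)]
            · simp only [List.map_cons, List.map_nil]
              rw [hInnerNew]
          rw [hstep]
          apply PySem.Dict.ext
          rw [PySem.Dict.items_insert_of_contains _ _ hc2]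
          show (pvFormB fd E ++ [(e.1.1.toString, PySem.Dict.empty)]).map _ = pvFormB fd (E ++ [e])
          rw [hSplit, List.map_append]
          congr 1
          · conv_rhs => rw [← List.map_id (pvFormB fd E)]
            apply List.map_congr_left
            intro x hx
            obtain ⟨y, hy, rfl⟩ := List.mem_map.1 hx
            have hax : ¬ y = e.1.1 := fun h => hmS (by rw [← h]; exact hy)
            have hne : (y.toString == e.1.1.toString) = false := by
              simp only [beq_eq_false_iff_ne, ne_eq]
              exact fun h => hax (pvToString_inj h)
            simp only [hne, Bool.false_eq_true, if_false, id_eq]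
          · simp
      · have hpassb : pvPass fd e.1.1 = false := by
          unfold pvPass
          exact decide_eq_false hpass
        have hstep : pvStepB fd (PySem.Dict.mk (pvFormB fd E)) e = PySem.Dict.mk (pvFormB fd E) := by
          unfold pvStepB
          rw [if_neg hpass]
        rw [hstep]
        congr 1
        unfold pvFormB
        rw [List.map_append]
        simp only [List.map_cons, List.map_nil]
        rw [pvSet_ofList_append_singleton, PySem.Set.add]
        by_cases hm : e.1.1 ∈ PySem.Set.ofList (E.map (fun x => x.1.1))
        · rw [if_pos (by simpa using hm)]
          apply List.map_congr_left
          intro a ha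
          have hap : ¬ e.1.1 = a := by
            intro h
            have := (List.mem_filter.1 ha).2
            rw [← h, hpassb] at this
            exact Bool.false_ne_true this
          rw [pvInnerB_append_ne E e a hap]
        · rw [if_neg (by simpa using hm), List.filter_append,
            show List.filter (pvPass fd) [e.1.1] = [] from by simp [hpassb], List.append_nil]
          apply List.map_congr_left
          intro a ha
          have hap : ¬ e.1.1 = a := by
            intro h
            have := (List.mem_filter.1 ha).2
            rw [← h, hpassb] at this
            exact Bool.false_ne_true this
          rw [pvInnerB_append_ne E e a hap]

theorem pvInnerB_counter (ps : List (Char × Char)) (a : Char) :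
    PySem.Dict.mk (pvInnerB ((PySem.Dict.counter ps).items) a)
      = PySem.Dict.counter (pvInner ps a) := by
  apply PySem.Dict.ext
  rw [show (PySem.Dict.mk (pvInnerB ((PySem.Dict.counter ps).items) a)).items
    = pvInnerB ((PySem.Dict.counter ps).items) a from rfl]
  rw [PySem.Dict.items_counter]
  unfold pvInnerB
  rw [PySem.Dict.items_counter, List.filter_map, List.map_map]
  have hfil : (PySem.Set.ofList ps).filter ((fun e => e.1.1 == a) ∘ (fun k => (k, (ps.count k : Int))))
      = PySem.Set.ofList (ps.filter (fun k => k.1 == a)) := by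
    rw [pvOfList_filter]
    rfl
  rw [hfil]
  have hinj : ∀ x ∈ ps.filter (fun k => k.1 == a), ∀ y ∈ ps.filter (fun k => k.1 == a),
      (fun k : Char × Char => k.2.toString) x = (fun k : Char × Char => k.2.toString) y → x = y := by
    intro x hx y hy hxy
    have hx1 : x.1 = a := beq_iff_eq.1 (List.mem_filter.1 hx).2
    have hy1 : y.1 = a := beq_iff_eq.1 (List.mem_filter.1 hy).2
    exact Prod.ext (hx1.trans hy1.symm) (pvToString_inj hxy)
  have hset : PySem.Set.ofList (pvInner ps a)
      = (PySem.Set.ofList (ps.filter (fun k => k.1 == a))).map (fun k => k.2.toString) := by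
    unfold pvInner
    rw [List.map_map]
    exact pvOfList_map_injOn _ _ hinj
  rw [hset, List.map_map]
  apply List.map_congr_left
  intro k hk
  have hkl : k ∈ ps.filter (fun k => k.1 == a) := (PySem.Set.mem_ofList _ _).1 hk
  have hcnt : (pvInner ps a).count k.2.toString = ps.count k := by
    have h1 : (pvInner ps a).count k.2.toString = (ps.filter (fun k => k.1 == a)).count k := by
      have : pvInner ps a = (ps.filter (fun k => k.1 == a)).map (fun k => k.2.toString) := by
        unfold pvInner
        rw [List.map_map]
        rfl
      rw [this]
      exact pvCount_map_injOn _ _ k (fun y hy hgy => hinj y hy k hkl hgy)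
    rw [h1]
    exact List.count_filter (List.mem_filter.1 hkl).2
  simp only [Function.comp_apply]
  rw [hcnt]

theorem pvFormB_counter (fd : PySem.Dict String Int) (ps : List (Char × Char)) :
    pvFormB fd ((PySem.Dict.counter ps).items) = pvForm fd ps := by
  unfold pvFormB pvForm
  have hset : PySem.Set.ofList (((PySem.Dict.counter ps).items).map (fun e => e.1.1))
      = PySem.Set.ofList (ps.map (fun p => p.1)) := by
    rw [PySem.Dict.items_counter, List.map_map]
    exact pvOfList_map_ofList ps (fun k => k.1)
  rw [hset]
  apply List.map_congr_left
  intro a _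
  rw [pvInnerB_counter]

theorem pvZip_eq_map_range (flat : List Char) :
    flat.zip (flat.drop 1) = (List.range (flat.length - 1)).map
      (fun k => (flat.getD k ' ', flat.getD (k + 1) ' ')) := by
  apply List.ext_getElem
  · simp only [List.length_zip, List.length_drop, List.length_map, List.length_range]
    omega
  · intro i h1 h2
    have hlen : flat.length - 1 < flat.length := by
      simp only [List.length_zip, List.length_drop] at h1
      omega
    have hi : i < flat.length - 1 := by
      simp only [List.length_zip, List.length_drop] at h1
      omega
    simp only [List.getElem_zip, List.getElem_drop, List.getElem_map, List.getElem_range]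
    rw [List.getD_eq_getElem _ _ (by omega), List.getD_eq_getElem _ _ (by omega)]
    simp [Nat.add_comm]

theorem pvIndexLoop (fd : PySem.Dict String Int) (flat : List Char) :
    (PySem.List.pyRange 0 ((flat.length : Int) - 1)).foldl (fun ttable i =>
      let w1 : String := (PySem.List.pyGetD flat i ' ').toString
      let w2 : String := (PySem.List.pyGetD flat (i + 1) ' ').toString
      if fd.getD w1 0 > 1 then
        let ttable := if ttable.contains w1 then ttable
                      else ttable.insert w1 PySem.Dict.empty
        if (ttable.getD w1 PySem.Dict.empty).contains w2 = false then
          ttable.insert w1 ((ttable.getD w1 PySem.Dict.empty).insert w2 1)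
        else
          ttable.insert w1 ((ttable.getD w1 PySem.Dict.empty).modify w2 0 (· + 1))
      else ttable) PySem.Dict.empty
    = (flat.zip (flat.drop 1)).foldl (pvStepA fd) PySem.Dict.empty := by
  cases hflat : flat with
  | nil => rfl
  | cons c rest =>
      rw [← hflat]
      have hlen : flat.length = rest.length + 1 := by rw [hflat]; rfl
      have hcast : ((flat.length : Int) - 1) = ((rest.length : Nat) : Int) := by
        rw [hlen]; push_cast; ring
      rw [hcast, PySem.List.pyRange_zero_natCast, List.foldl_map,
        pvZip_eq_map_range flat, List.foldl_map, hlen]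
      simp only [Nat.add_sub_cancel]
      apply PySem.List.foldl_congr_mem
      intro acc k _
      show _ = pvStepA fd acc (flat.getD k ' ', flat.getD (k + 1) ' ')
      have h2 : ((k : Int) + 1) = ((k + 1 : Nat) : Int) := by push_cast; ring
      simp only [PySem.List.pyGetD_natCast, h2]
      rfl

theorem pv_final (corpus : List String) (frequency_table : List (String × Int)) :
    transition_table corpus frequency_table = transition_table_alt corpus frequency_table := by
  unfold transition_table transition_table_alt
  simp only []
  rw [pvIndexLoop (PySem.Dict.mk frequency_table) (corpus.flatMap String.toList),
    pvBuildA_form]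
  rw [PySem.List.slice_from _ (by norm_num : (0:Int) ≤ 1)]
  rw [show ((1:Int)).toNat = 1 from rfl]
  rw [PySem.Dict.foldl_insert_getD_add_one_eq_counter]
  rw [show (fun (ttable : PySem.Dict String (PySem.Dict String Int)) (e : (Char × Char) × Int) =>
      let w1 : String := e.1.1.toString
      let w2 : String := e.1.2.toString
      if (PySem.Dict.mk frequency_table).getD w1 0 > 1 then
        let ttable := if ttable.contains w1 then ttable
                      else ttable.insert w1 PySem.Dict.empty
        ttable.insert w1 ((ttable.getD w1 PySem.Dict.empty).insert w2 e.2)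
      else ttable) = pvStepB (PySem.Dict.mk frequency_table) from rfl]
  rw [pvBuildB_form _ _ (PySem.Dict.nodup_keys_counter _),
    pvFormB_counter]

-- ===== VERDICT (by name: the statement is the Claim_ definition above) =====
theorem transition_table_spec : Claim_equal_transition_table := by
  intro corpus frequency_table _hdom _hpre
  unfold Spec_transition_table
  exact pv_final corpus frequency_table
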